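-- pv_equiv track=rewrite | github.com/vagison/geeks-for-geeks | practice/remove_leading_zeros_from_an_IP_address.py | newIPAdd
-- ===== SOURCE A (Python) =====
-- def newIPAdd(s):
--     ipIntoArray = s.split('.')
--     resultingIp = ""
--
--     for element in range(0, len(ipIntoArray)):
--         param = False
--
--         for char in range(0, len(ipIntoArray[element])):
--             if ipIntoArray[element][char] == "0" and param != True and char != len(ipIntoArray[element]) - 1:
--                 pass
--
--             else:
--                 param = True
--                 resultingIp = resultingIp + ipIntoArray[element][char]
--
--         resultingIp = resultingIp + "."
--
--     resultingIp = resultingIp[0:(len(resultingIp) - 1)]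
--
--     return resultingIp
-- ===== SOURCE B (Python) =====
-- def newIPAdd(s):
--     return '.'.join(o.lstrip('0') or o[-1:] for o in s.split('.'))
-- ===== Notes on version B (the rewrite author's own statement) =====
-- stated objective: idiomatic
-- what changed: Replaces the index-based nested loops with a skip flag, repeated string concatenation and trailing-dot trimming by a declarative split / per-octet lstrip with last-char fallback / join pipeline.
import Mathlib
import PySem

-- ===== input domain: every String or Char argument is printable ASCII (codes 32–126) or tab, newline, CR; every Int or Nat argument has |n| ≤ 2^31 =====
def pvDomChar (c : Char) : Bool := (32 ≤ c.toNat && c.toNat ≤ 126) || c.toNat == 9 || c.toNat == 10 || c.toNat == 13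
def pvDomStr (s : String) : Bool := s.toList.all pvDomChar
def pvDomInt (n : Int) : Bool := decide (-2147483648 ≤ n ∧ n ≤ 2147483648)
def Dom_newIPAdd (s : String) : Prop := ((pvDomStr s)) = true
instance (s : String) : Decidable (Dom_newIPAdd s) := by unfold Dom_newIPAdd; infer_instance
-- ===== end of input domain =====

-- B replaces A's index-based nested loops (skip flag + trailing-dot trim) by a declarative
-- split / per-octet lstrip('0')-with-last-char-fallback / join pipeline (objective: idiomatic).

-- ===== PORT A =====
-- inner 'for char in range(...)' loop of A, carrying the flag 'param' and the accumulated
-- string; 'char != len(...) - 1' becomes 'the remaining tail is nonempty'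
def innerA : List Char → Bool → List Char → Bool × List Char
  | [], param, acc => (param, acc)
  | c :: rest, param, acc =>
      if c == '0' && !param && !rest.isEmpty then innerA rest param acc
      else innerA rest true (acc ++ [c])

def newIPAdd (s : String) : String :=
  let ipIntoArray := PySem.Chars.splitOn s.toList ['.']
  let resultingIp := ipIntoArray.foldl (fun acc oct => (innerA oct false acc).2 ++ ['.']) []
  String.ofList (PySem.List.slice resultingIp (some 0) (some ((resultingIp.length : Int) - 1)))

-- ===== PORT B =====
-- oct.lstrip('0') or oct[-1:] — dropWhile (· == '0') is exactly lstrip('0') (drop the leading run of '0')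
def trimOct (o : List Char) : List Char :=
  let t := o.dropWhile (· == '0')
  if t = [] then PySem.List.slice o (some (-1)) none else t

def newIPAdd_alt (s : String) : String :=
  String.ofList (PySem.Chars.join ['.'] ((PySem.Chars.splitOn s.toList ['.']).map trimOct))

-- ===== PRECONDITION & SPEC =====
def Spec_newIPAdd (s : String) (out : String) : Prop := out = newIPAdd_alt s
instance (s : String) (out : String) : Decidable (Spec_newIPAdd s out) := by unfold Spec_newIPAdd; infer_instance

-- ===== CLAIM (what is proved, stated in full; the proofs are below) =====
def Claim_equal_newIPAdd : Prop := ∀ (s : String), Dom_newIPAdd s → Spec_newIPAdd s (newIPAdd s)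

-- ===== LEMMAS AND PROOFS =====

-- once param is true, A's inner loop copies the rest of the octet
theorem innerA_true (l : List Char) : ∀ acc, (innerA l true acc).2 = acc ++ l := by
  induction l with
  | nil => intro acc; simp [innerA]
  | cons c rest ih => intro acc; simp [innerA, ih]

-- trimOct on an octet that starts with '0' and has more characters: drop that zero
theorem trimOct_cons_zero (tl : List Char) (h : tl ≠ []) :
    trimOct ('0' :: tl) = trimOct tl := by
  cases tl with
  | nil => exact absurd rfl h
  | cons d tl' =>
    have hd : List.dropWhile (fun x => x == '0') ('0' :: d :: tl')
        = List.dropWhile (fun x => x == '0') (d :: tl') := by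
      rw [List.dropWhile_cons]; simp
    simp only [trimOct, hd]
    split_ifs with h1
    · rw [PySem.List.slice_from_neg_one, PySem.List.slice_from_neg_one]
      simp
    · rfl

-- trimOct keeps an octet whose first character is not '0'
theorem trimOct_cons_ne (c : Char) (rest : List Char) (hc : ¬ c = '0') :
    trimOct (c :: rest) = c :: rest := by
  simp [trimOct, hc]

-- A's inner loop from a fresh flag appends exactly B's trimmed octet
theorem innerA_false (o : List Char) : ∀ acc, (innerA o false acc).2 = acc ++ trimOct o := by
  induction o with
  | nil => intro acc; simp [innerA, trimOct, PySem.List.slice]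
  | cons c rest ih =>
    intro acc
    by_cases hc : c = '0'
    · subst hc
      cases rest with
      | nil => simp [innerA, trimOct, PySem.List.slice]
      | cons d tl =>
        have hstep : innerA ('0' :: d :: tl) false acc = innerA (d :: tl) false acc := by
          simp [innerA]
        rw [hstep, ih, trimOct_cons_zero _ (by simp)]
    · have hstep : innerA (c :: rest) false acc = innerA rest true (acc ++ [c]) := by
        simp [innerA, hc]
      rw [hstep, innerA_true, trimOct_cons_ne _ _ hc, List.append_assoc]
      rfl

-- A's outer foldl flattens the trimmed octets, each followed by a '.'
theorem foldA_eq (ps : List (List Char)) : ∀ acc,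
    ps.foldl (fun acc oct => (innerA oct false acc).2 ++ ['.']) acc
      = acc ++ (ps.map (fun o => trimOct o ++ ['.'])).flatten := by
  induction ps with
  | nil => intro acc; simp
  | cons p ps ih => intro acc; simp [List.foldl_cons, innerA_false]

-- on a nonempty list of octets the dot-terminated flattening is join + one trailing '.'
theorem flatten_eq_join (p : List Char) (ps : List (List Char)) :
    ((p :: ps).map (fun o => trimOct o ++ ['.'])).flatten
      = PySem.Chars.join ['.'] ((p :: ps).map trimOct) ++ ['.'] := by
  induction ps generalizing p with
  | nil => simp [PySem.Chars.join_singleton]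
  | cons q ps ih =>
    rw [List.map_cons, List.flatten_cons, ih q]
    simp [PySem.Chars.join_cons_cons]

-- ===== VERDICT (by name: the statement is the Claim_ definition above) =====
theorem newIPAdd_spec : Claim_equal_newIPAdd := by
  intro s _
  unfold Spec_newIPAdd
  simp only [newIPAdd, newIPAdd_alt]
  cases h : PySem.Chars.splitOn s.toList ['.'] with
  | nil => rfl
  | cons p ps =>
    rw [foldA_eq, List.nil_append, flatten_eq_join]
    congr 1
    rw [PySem.List.slice_zero_start]
    have hlen : ((PySem.Chars.join ['.'] ((p :: ps).map trimOct) ++ ['.']).length : Int) - 1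
        = ((PySem.Chars.join ['.'] ((p :: ps).map trimOct)).length : Int) := by
      simp only [List.length_append, List.length_cons, List.length_nil]
      push_cast
      ring
    rw [hlen, PySem.List.slice_to_natCast, List.take_left]
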